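-- pv_equiv track=rewrite | github.com/monal95/ai-hiring-systems | backend/models/interview_system.py | _generate_behavioral_questions
-- ===== SOURCE A (Python) =====
-- def _generate_behavioral_questions(count: int) -> list:
--     """Generate behavioral questions"""
--     behavioral_questions = [
--         {'id': 'B1', 'question': 'Tell us about a time when you had to work with a difficult team member. How did you handle it?', 'type': 'behavioral', 'competency': 'teamwork', 'difficulty': 'easy'},
--         {'id': 'B2', 'question': 'Describe a project failure. What did you learn and how would you approach it differently?', 'type': 'behavioral', 'competency': 'resilience', 'difficulty': 'medium'},
--         {'id': 'B3', 'question': 'How do you stay updated with new technologies and industry trends?', 'type': 'behavioral', 'competency': 'continuous_learning', 'difficulty': 'easy'},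
--         {'id': 'B4', 'question': 'What interests you about this role and our company?', 'type': 'behavioral', 'competency': 'motivation', 'difficulty': 'easy'},
--         {'id': 'B5', 'question': 'Tell me about a time you took initiative on a project without being asked.', 'type': 'behavioral', 'competency': 'initiative', 'difficulty': 'medium'},
--         {'id': 'B6', 'question': 'How do you handle feedback and criticism from colleagues?', 'type': 'behavioral', 'competency': 'adaptability', 'difficulty': 'medium'},
--         {'id': 'B7', 'question': 'Describe a situation where you had to make a difficult decision with incomplete information.', 'type': 'behavioral', 'competency': 'decision_making', 'difficulty': 'medium'},
--         {'id': 'B8', 'question': 'Tell me about a time you mentored or helped a junior team member.', 'type': 'behavioral', 'competency': 'leadership', 'difficulty': 'hard'},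
--         {'id': 'B9', 'question': 'How do you prioritize when you have multiple competing deadlines?', 'type': 'behavioral', 'competency': 'time_management', 'difficulty': 'easy'},
--         {'id': 'B10', 'question': 'Describe a complex technical problem you solved and your approach.', 'type': 'behavioral', 'competency': 'problem_solving', 'difficulty': 'hard'},
--         {'id': 'B11', 'question': 'Tell me about a time you had to communicate complex ideas to non-technical stakeholders.', 'type': 'behavioral', 'competency': 'communication', 'difficulty': 'medium'},
--         {'id': 'B12', 'question': 'How do you approach learning a new technology or framework?', 'type': 'behavioral', 'competency': 'learning', 'difficulty': 'easy'},
--         {'id': 'B13', 'question': 'Describe a time when your solution was rejected and how you handled it.', 'type': 'behavioral', 'competency': 'resilience', 'difficulty': 'medium'},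
--         {'id': 'B14', 'question': 'Tell me about your experience working in an agile/fast-paced environment.', 'type': 'behavioral', 'competency': 'adaptability', 'difficulty': 'medium'},
--         {'id': 'B15', 'question': 'How do you ensure code quality and prevent bugs in your projects?', 'type': 'behavioral', 'competency': 'quality_focus', 'difficulty': 'easy'},
--         {'id': 'B16', 'question': 'Describe a conflict with a colleague and how you resolved it.', 'type': 'behavioral', 'competency': 'conflict_resolution', 'difficulty': 'hard'},
--         {'id': 'B17', 'question': 'Tell me about your biggest professional achievement.', 'type': 'behavioral', 'competency': 'accomplishment', 'difficulty': 'medium'},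
--         {'id': 'B18', 'question': 'How do you stay motivated during long, challenging projects?', 'type': 'behavioral', 'competency': 'motivation', 'difficulty': 'easy'},
--         {'id': 'B19', 'question': 'Describe a time you had to work with an unfamiliar technology or tool.', 'type': 'behavioral', 'competency': 'adaptability', 'difficulty': 'medium'},
--         {'id': 'B20', 'question': 'Where do you see yourself in 5 years and how does this role fit into your career goals?', 'type': 'behavioral', 'competency': 'vision', 'difficulty': 'hard'},
--     ]
--
--     # Return requested count, cycling through if needed
--     result = []
--     for i in range(count):
--         result.append(behavioral_questions[i % len(behavioral_questions)])
--     return result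
-- ===== SOURCE B (Python) =====
-- def _generate_behavioral_questions(count: int) -> list:
--     """Generate behavioral questions"""
--     rows = [
--         ("B1", "Tell us about a time when you had to work with a difficult team member. How did you handle it?", "teamwork", "easy"),
--         ("B2", "Describe a project failure. What did you learn and how would you approach it differently?", "resilience", "medium"),
--         ("B3", "How do you stay updated with new technologies and industry trends?", "continuous_learning", "easy"),
--         ("B4", "What interests you about this role and our company?", "motivation", "easy"),
--         ("B5", "Tell me about a time you took initiative on a project without being asked.", "initiative", "medium"),
--         ("B6", "How do you handle feedback and criticism from colleagues?", "adaptability", "medium"),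
--         ("B7", "Describe a situation where you had to make a difficult decision with incomplete information.", "decision_making", "medium"),
--         ("B8", "Tell me about a time you mentored or helped a junior team member.", "leadership", "hard"),
--         ("B9", "How do you prioritize when you have multiple competing deadlines?", "time_management", "easy"),
--         ("B10", "Describe a complex technical problem you solved and your approach.", "problem_solving", "hard"),
--         ("B11", "Tell me about a time you had to communicate complex ideas to non-technical stakeholders.", "communication", "medium"),
--         ("B12", "How do you approach learning a new technology or framework?", "learning", "easy"),
--         ("B13", "Describe a time when your solution was rejected and how you handled it.", "resilience", "medium"),
--         ("B14", "Tell me about your experience working in an agile/fast-paced environment.", "adaptability", "medium"),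
--         ("B15", "How do you ensure code quality and prevent bugs in your projects?", "quality_focus", "easy"),
--         ("B16", "Describe a conflict with a colleague and how you resolved it.", "conflict_resolution", "hard"),
--         ("B17", "Tell me about your biggest professional achievement.", "accomplishment", "medium"),
--         ("B18", "How do you stay motivated during long, challenging projects?", "motivation", "easy"),
--         ("B19", "Describe a time you had to work with an unfamiliar technology or tool.", "adaptability", "medium"),
--         ("B20", "Where do you see yourself in 5 years and how does this role fit into your career goals?", "vision", "hard"),
--     ]
--     qs = [
--         {"id": qid, "question": text, "type": "behavioral", "competency": comp, "difficulty": diff}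
--         for qid, text, comp, diff in rows
--     ]
--     if count <= 0:
--         return []
--     full, rem = divmod(count, len(qs))
--     return qs * full + qs[:rem]
-- ===== Notes on version B (the rewrite author's own statement) =====
-- stated objective: alternative
-- what changed: B stores the questions as compact (id, question, competency, difficulty) tuples expanded into dicts by a comprehension, and replaces the per-element modulo-indexed append loop with divmod plus list replication and a single slice (guarding non-positive counts).
import Mathlib
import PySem

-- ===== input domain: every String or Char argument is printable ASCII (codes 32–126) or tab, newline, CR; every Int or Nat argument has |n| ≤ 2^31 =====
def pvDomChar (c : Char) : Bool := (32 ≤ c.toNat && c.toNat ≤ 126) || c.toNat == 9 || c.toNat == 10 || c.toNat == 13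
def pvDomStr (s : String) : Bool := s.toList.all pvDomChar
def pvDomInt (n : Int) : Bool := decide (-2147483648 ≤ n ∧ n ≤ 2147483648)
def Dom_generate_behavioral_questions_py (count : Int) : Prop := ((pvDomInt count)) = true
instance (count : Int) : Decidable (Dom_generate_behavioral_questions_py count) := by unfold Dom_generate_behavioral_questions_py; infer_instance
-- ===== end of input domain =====

-- ===== PORT A =====
-- B keeps the questions as compact 4-tuples expanded into dicts by a map, and replaces A's
-- modulo-indexed append loop with divmod, list replication and one slice (objective: alternative).

def behavioralQuestionsList : List (List (String × String)) := [
  [("id", "B1"), ("question", "Tell us about a time when you had to work with a difficult team member. How did you handle it?"), ("type", "behavioral"), ("competency", "teamwork"), ("difficulty", "easy")],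
  [("id", "B2"), ("question", "Describe a project failure. What did you learn and how would you approach it differently?"), ("type", "behavioral"), ("competency", "resilience"), ("difficulty", "medium")],
  [("id", "B3"), ("question", "How do you stay updated with new technologies and industry trends?"), ("type", "behavioral"), ("competency", "continuous_learning"), ("difficulty", "easy")],
  [("id", "B4"), ("question", "What interests you about this role and our company?"), ("type", "behavioral"), ("competency", "motivation"), ("difficulty", "easy")],
  [("id", "B5"), ("question", "Tell me about a time you took initiative on a project without being asked."), ("type", "behavioral"), ("competency", "initiative"), ("difficulty", "medium")],
  [("id", "B6"), ("question", "How do you handle feedback and criticism from colleagues?"), ("type", "behavioral"), ("competency", "adaptability"), ("difficulty", "medium")],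
  [("id", "B7"), ("question", "Describe a situation where you had to make a difficult decision with incomplete information."), ("type", "behavioral"), ("competency", "decision_making"), ("difficulty", "medium")],
  [("id", "B8"), ("question", "Tell me about a time you mentored or helped a junior team member."), ("type", "behavioral"), ("competency", "leadership"), ("difficulty", "hard")],
  [("id", "B9"), ("question", "How do you prioritize when you have multiple competing deadlines?"), ("type", "behavioral"), ("competency", "time_management"), ("difficulty", "easy")],
  [("id", "B10"), ("question", "Describe a complex technical problem you solved and your approach."), ("type", "behavioral"), ("competency", "problem_solving"), ("difficulty", "hard")],
  [("id", "B11"), ("question", "Tell me about a time you had to communicate complex ideas to non-technical stakeholders."), ("type", "behavioral"), ("competency", "communication"), ("difficulty", "medium")],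
  [("id", "B12"), ("question", "How do you approach learning a new technology or framework?"), ("type", "behavioral"), ("competency", "learning"), ("difficulty", "easy")],
  [("id", "B13"), ("question", "Describe a time when your solution was rejected and how you handled it."), ("type", "behavioral"), ("competency", "resilience"), ("difficulty", "medium")],
  [("id", "B14"), ("question", "Tell me about your experience working in an agile/fast-paced environment."), ("type", "behavioral"), ("competency", "adaptability"), ("difficulty", "medium")],
  [("id", "B15"), ("question", "How do you ensure code quality and prevent bugs in your projects?"), ("type", "behavioral"), ("competency", "quality_focus"), ("difficulty", "easy")],
  [("id", "B16"), ("question", "Describe a conflict with a colleague and how you resolved it."), ("type", "behavioral"), ("competency", "conflict_resolution"), ("difficulty", "hard")],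
  [("id", "B17"), ("question", "Tell me about your biggest professional achievement."), ("type", "behavioral"), ("competency", "accomplishment"), ("difficulty", "medium")],
  [("id", "B18"), ("question", "How do you stay motivated during long, challenging projects?"), ("type", "behavioral"), ("competency", "motivation"), ("difficulty", "easy")],
  [("id", "B19"), ("question", "Describe a time you had to work with an unfamiliar technology or tool."), ("type", "behavioral"), ("competency", "adaptability"), ("difficulty", "medium")],
  [("id", "B20"), ("question", "Where do you see yourself in 5 years and how does this role fit into your career goals?"), ("type", "behavioral"), ("competency", "vision"), ("difficulty", "hard")]
]

def generate_behavioral_questions_py (count : Int) : List (List (String × String)) :=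
  -- result = []; for i in range(count): result.append(qs[i % len(qs)])
  -- the index i % 20 is always in range for i in range(count), so pyGetD's default is never taken
  (PySem.List.pyRange 0 count 1).foldl
    (fun result i =>
      result ++ [PySem.List.pyGetD behavioralQuestionsList
        (PySem.Int.mod i (behavioralQuestionsList.length : Int)) []]) []

-- ===== PORT B =====
-- B's data: compact rows (id, question, competency, difficulty)
def pvRowsB : List (String × String × String × String) := [
  ("B1", "Tell us about a time when you had to work with a difficult team member. How did you handle it?", "teamwork", "easy"),
  ("B2", "Describe a project failure. What did you learn and how would you approach it differently?", "resilience", "medium"),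
  ("B3", "How do you stay updated with new technologies and industry trends?", "continuous_learning", "easy"),
  ("B4", "What interests you about this role and our company?", "motivation", "easy"),
  ("B5", "Tell me about a time you took initiative on a project without being asked.", "initiative", "medium"),
  ("B6", "How do you handle feedback and criticism from colleagues?", "adaptability", "medium"),
  ("B7", "Describe a situation where you had to make a difficult decision with incomplete information.", "decision_making", "medium"),
  ("B8", "Tell me about a time you mentored or helped a junior team member.", "leadership", "hard"),
  ("B9", "How do you prioritize when you have multiple competing deadlines?", "time_management", "easy"),
  ("B10", "Describe a complex technical problem you solved and your approach.", "problem_solving", "hard"),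
  ("B11", "Tell me about a time you had to communicate complex ideas to non-technical stakeholders.", "communication", "medium"),
  ("B12", "How do you approach learning a new technology or framework?", "learning", "easy"),
  ("B13", "Describe a time when your solution was rejected and how you handled it.", "resilience", "medium"),
  ("B14", "Tell me about your experience working in an agile/fast-paced environment.", "adaptability", "medium"),
  ("B15", "How do you ensure code quality and prevent bugs in your projects?", "quality_focus", "easy"),
  ("B16", "Describe a conflict with a colleague and how you resolved it.", "conflict_resolution", "hard"),
  ("B17", "Tell me about your biggest professional achievement.", "accomplishment", "medium"),
  ("B18", "How do you stay motivated during long, challenging projects?", "motivation", "easy"),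
  ("B19", "Describe a time you had to work with an unfamiliar technology or tool.", "adaptability", "medium"),
  ("B20", "Where do you see yourself in 5 years and how does this role fit into your career goals?", "vision", "hard")
]

-- expand one compact row into the dict the API returns
def pvMkQuestion (r : String × String × String × String) : List (String × String) :=
  [("id", r.1), ("question", r.2.1), ("type", "behavioral"),
   ("competency", r.2.2.1), ("difficulty", r.2.2.2)]

def generate_behavioral_questions_py_alt (count : Int) : List (List (String × String)) :=
  let qs := pvRowsB.map pvMkQuestion
  if count ≤ 0 then []
  else
    let full := PySem.Int.floordiv count (qs.length : Int)
    let rem := PySem.Int.mod count (qs.length : Int)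
    (List.replicate full.toNat qs).flatten ++ PySem.List.slice qs none (some rem)

-- ===== PRECONDITION & SPEC =====
def Spec_generate_behavioral_questions_py (count : Int) (out : List (List (String × String))) : Prop := out = generate_behavioral_questions_py_alt count
instance (count : Int) (out : List (List (String × String))) : Decidable (Spec_generate_behavioral_questions_py count out) := by unfold Spec_generate_behavioral_questions_py; infer_instance

-- ===== CLAIM (what is proved, stated in full; the proofs are below) =====
def Claim_equal_generate_behavioral_questions_py : Prop := ∀ (count : Int), Dom_generate_behavioral_questions_py count → Spec_generate_behavioral_questions_py count (generate_behavioral_questions_py count)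

-- ===== LEMMAS AND PROOFS =====

-- B's compact rows expand to exactly A's dict list
theorem pv_rows_expand : pvRowsB.map pvMkQuestion = behavioralQuestionsList := by rfl

-- take m ++ [getD m] extends a prefix by one element
theorem pv_take_getD {α : Type} (L : List α) (d : α) (m : Nat) (h : m < L.length) :
    L.take m ++ [L.getD m d] = L.take (m + 1) := by
  rw [List.getD_eq_getElem L d h, List.take_add_one]
  simp [List.getElem?_eq_getElem h]

-- the append-in-a-loop shape of A's fold is a map
theorem pv_foldl_append_map {α β : Type} (f : β → α) (xs : List β) (acc : List α) :
    xs.foldl (fun acc i => acc ++ [f i]) acc = acc ++ xs.map f := by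
  induction xs generalizing acc with
  | nil => simp
  | cons x xs ih => simp [List.foldl_cons, ih]

-- cycling through a 20-element list n times is replication plus a prefix
theorem pv_cyc {α : Type} (L : List α) (d : α) (hL : L.length = 20) (n : Nat) :
    (List.range n).map (fun k => L.getD (k % 20) d)
      = (List.replicate (n / 20) L).flatten ++ L.take (n % 20) := by
  induction n with
  | zero => simp
  | succ n ih =>
    rw [List.range_succ, List.map_append, ih, List.map_singleton, List.append_assoc]
    by_cases h19 : n % 20 = 19
    · have hdiv : (n + 1) / 20 = n / 20 + 1 := by omega
      have hmod : (n + 1) % 20 = 0 := by omega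
      rw [hdiv, hmod, List.replicate_succ', List.flatten_append, List.take_zero,
          List.append_nil, pv_take_getD L d (n % 20) (by omega), h19]
      simp [List.take_of_length_le (by omega : L.length ≤ 20)]
    · have hdiv : (n + 1) / 20 = n / 20 := by omega
      have hmod : (n + 1) % 20 = n % 20 + 1 := by omega
      rw [hdiv, hmod, pv_take_getD L d (n % 20) (by omega)]

theorem pv_len : behavioralQuestionsList.length = 20 := by decide

theorem pv_A_nat (n : Nat) :
    generate_behavioral_questions_py (n : Int)
      = (List.range n).map (fun k => behavioralQuestionsList.getD (k % 20) []) := by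
  unfold generate_behavioral_questions_py
  rw [PySem.List.pyRange_one, pv_foldl_append_map, List.nil_append]
  have hn : ((n : Int) - 0).toNat = n := by omega
  rw [hn, List.map_map]
  apply List.map_congr_left
  intro k _
  simp only [Function.comp, zero_add, pv_len]
  rw [PySem.Int.mod_natCast k 20, PySem.List.pyGetD_natCast]

-- ===== VERDICT (by name: the statement is the Claim_ definition above) =====
theorem generate_behavioral_questions_py_spec : Claim_equal_generate_behavioral_questions_py := by
  intro count _
  unfold Spec_generate_behavioral_questions_py generate_behavioral_questions_py_alt
  rw [pv_rows_expand]
  by_cases hle : count ≤ 0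
  · simp only [hle, if_true]
    unfold generate_behavioral_questions_py
    rw [PySem.List.pyRange_one_eq_nil (by omega)]
    rfl
  · simp only [hle, if_false]
    obtain ⟨n, rfl⟩ : ∃ n : Nat, count = (n : Int) :=
      ⟨count.toNat, (Int.toNat_of_nonneg (by omega)).symm⟩
    rw [pv_A_nat, pv_cyc behavioralQuestionsList [] pv_len n]
    simp only [pv_len]
    rw [PySem.Int.floordiv_natCast n 20, PySem.Int.mod_natCast n 20,
        PySem.List.slice_to_natCast, Int.toNat_natCast]
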